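-- pv_equiv track=rewrite | github.com/Fadis/vulkan2json | generator/vulkan_header_parser/get_end_of_typename.py | get_end_of_typename
-- ===== SOURCE A (Python) =====
-- def get_end_of_typename( line ):
--   init = True
--   depth = 0
--   index = 0
--   prefix_end = 0
--   end_candidate = 0
--   keywords=set( [ 'struct', 'const', 'volatile', 'static', '*', '&', '&&' ] )
--   for c in line.rstrip():
--     if not c.isspace() and init:
--       init = False
--     elif c.isspace() and depth == 0 and not init:
--       if line[prefix_end:index].lstrip().rstrip() in keywords:
--         if end_candidate != 0:
--           end_candidate = index
--         prefix_end = index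
--         init = True
--       elif end_candidate == 0:
--         end_candidate = index
--         prefix_end = index
--         init = True
--       else:
--         return end_candidate
--     elif c == '<':
--       depth += 1
--     elif c == '>':
--       depth -= 1
--     index += 1
--   if line[prefix_end:index].lstrip().rstrip() in keywords:
--     return index
--   elif end_candidate == 0:
--     return index
--   else:
--     return end_candidate
-- ===== SOURCE B (Python) =====
-- def get_end_of_typename(line):
--     keywords = set(['struct', 'const', 'volatile', 'static', '*', '&', '&&'])
--     s = line.rstrip()
--     # pass 1: end index of every depth-0 whitespace-terminated token, plus len(s) as final end
--     ends = []
--     in_token = False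
--     depth = 0
--     for i, c in enumerate(s):
--         if c.isspace():
--             if in_token and depth == 0:
--                 ends.append(i)
--                 in_token = False
--         elif not in_token:
--             in_token = True
--         elif c == '<':
--             depth += 1
--         elif c == '>':
--             depth -= 1
--     ends.append(len(s))
--     # pass 2: keyword/typename logic over tokens
--     prev = 0
--     end_candidate = 0
--     for e in ends[:-1]:
--         tok = line[prev:e].strip()
--         prev = e
--         if tok in keywords:
--             if end_candidate != 0:
--                 end_candidate = e
--         elif end_candidate == 0:
--             end_candidate = e
--         else:
--             return end_candidate
--     last = ends[-1]
--     if line[prev:last].strip() in keywords: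
--         return last
--     if end_candidate == 0:
--         return last
--     return end_candidate
-- ===== Notes on version B (the rewrite author's own statement) =====
-- stated objective: alternative
-- what changed: A's single character loop that interleaves token scanning with the keyword/typename decision (five mutable state variables) is split into two passes: a tokenizer that records the end index of each depth-0 whitespace-terminated token, then a per-token loop applying the keyword logic.
import Mathlib
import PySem

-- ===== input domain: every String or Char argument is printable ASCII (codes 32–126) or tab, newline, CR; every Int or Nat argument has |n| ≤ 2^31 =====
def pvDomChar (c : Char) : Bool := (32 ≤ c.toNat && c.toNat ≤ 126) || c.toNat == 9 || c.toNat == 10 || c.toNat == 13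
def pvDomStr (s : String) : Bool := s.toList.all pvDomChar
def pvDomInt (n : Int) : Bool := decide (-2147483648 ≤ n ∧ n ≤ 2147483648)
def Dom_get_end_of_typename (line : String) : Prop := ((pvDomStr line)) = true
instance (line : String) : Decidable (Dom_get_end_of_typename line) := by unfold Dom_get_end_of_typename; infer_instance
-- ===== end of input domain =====

-- B replaces A's fused character loop (five mutable variables, token logic interleaved with
-- scanning) by two simple passes: tokenize into end indices, then run the keyword logic per token.

-- ===== PORT A =====
-- keywords = set([...])
def pvKeywords : PySem.Set (List Char) :=
  PySem.Set.ofList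
    ["struct".toList, "const".toList, "volatile".toList, "static".toList,
     "*".toList, "&".toList, "&&".toList]

-- the 'for c in line.rstrip():' loop with state (init, depth, index, prefix_end, end_candidate),
-- followed by the post-loop tail; early 'return end_candidate' is the non-recursive branch
def pvLoopA (line : List Char) : List Char → Bool → Int → Int → Int → Int → Int
  | [], _, _, index, prefix_end, end_candidate =>
      if pvKeywords.contains
          (PySem.Chars.rstrip (PySem.Chars.lstrip
            (PySem.List.slice line (some prefix_end) (some index)))) then index
      else if end_candidate == 0 then index
      else end_candidate
  | c :: cs, init, depth, index, prefix_end, end_candidate =>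
      if !PySem.Chars.isspace c && init then
        pvLoopA line cs false depth (index + 1) prefix_end end_candidate
      else if PySem.Chars.isspace c && depth == 0 && !init then
        if pvKeywords.contains
            (PySem.Chars.rstrip (PySem.Chars.lstrip
              (PySem.List.slice line (some prefix_end) (some index)))) then
          pvLoopA line cs true depth (index + 1) index
            (if end_candidate != 0 then index else end_candidate)
        else if end_candidate == 0 then
          pvLoopA line cs true depth (index + 1) index index
        else end_candidate
      else if c == '<' then
        pvLoopA line cs init (depth + 1) (index + 1) prefix_end end_candidate
      else if c == '>' then
        pvLoopA line cs init (depth - 1) (index + 1) prefix_end end_candidate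
      else
        pvLoopA line cs init depth (index + 1) prefix_end end_candidate

def get_end_of_typename (line : String) : Int :=
  pvLoopA line.toList (PySem.Chars.rstrip line.toList) true 0 0 0 0

-- ===== PORT B =====
-- pass 1: end index of every depth-0 whitespace-terminated token, plus len(s) as final end
def pvTokenize : List Char → Bool → Int → Int → List Int
  | [], _, _, i => [i]
  | c :: cs, inTok, depth, i =>
      if PySem.Chars.isspace c then
        if inTok && depth == 0 then i :: pvTokenize cs false depth (i + 1)
        else pvTokenize cs inTok depth (i + 1)
      else if !inTok then pvTokenize cs true depth (i + 1)
      else if c == '<' then pvTokenize cs inTok (depth + 1) (i + 1)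
      else if c == '>' then pvTokenize cs inTok (depth - 1) (i + 1)
      else pvTokenize cs inTok depth (i + 1)

-- pass 2: keyword/typename logic over tokens (last entry of ends is the final token's end)
def pvProcess (line : List Char) : List Int → Int → Int → Int
  | [last], prev, end_candidate =>
      if pvKeywords.contains
          (PySem.Chars.strip (PySem.List.slice line (some prev) (some last))) then last
      else if end_candidate == 0 then last
      else end_candidate
  | e :: rest, prev, end_candidate =>
      if pvKeywords.contains
          (PySem.Chars.strip (PySem.List.slice line (some prev) (some e))) then
        pvProcess line rest e (if end_candidate != 0 then e else end_candidate)
      else if end_candidate == 0 then pvProcess line rest e e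
      else end_candidate
  | [], _, end_candidate => end_candidate   -- unreachable: ends is never empty

def get_end_of_typename_alt (line : String) : Int :=
  pvProcess line.toList (pvTokenize (PySem.Chars.rstrip line.toList) false 0 0) 0 0

-- ===== PRECONDITION & SPEC =====
def Spec_get_end_of_typename (line : String) (out : Int) : Prop := out = get_end_of_typename_alt line
instance (line : String) (out : Int) : Decidable (Spec_get_end_of_typename line out) := by unfold Spec_get_end_of_typename; infer_instance

-- ===== CLAIM (what is proved, stated in full; the proofs are below) =====
def Claim_equal_get_end_of_typename : Prop := ∀ (line : String), Dom_get_end_of_typename line → Spec_get_end_of_typename line (get_end_of_typename line)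

-- ===== LEMMAS AND PROOFS =====

-- fusion: A's single interleaved loop equals tokenize-then-process from matching states
theorem pvFuse (line : List Char) : ∀ (cs : List Char) (init : Bool) (depth index prefix_end ec : Int),
    pvLoopA line cs init depth index prefix_end ec
      = pvProcess line (pvTokenize cs (!init) depth index) prefix_end ec := by
  intro cs
  induction cs with
  | nil =>
      intro init depth index prefix_end ec
      simp [pvLoopA, pvTokenize, pvProcess, PySem.Chars.strip]
  | cons c cs ih =>
      intro init depth index prefix_end ec
      by_cases hs : PySem.Chars.isspace c = true
      · by_cases hi : init = true
        · -- space while between tokens: state unchanged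
          have hns : c ≠ '<' ∧ c ≠ '>' := by
            constructor <;> rintro rfl <;> simp [PySem.Chars.isspace] at hs
          simp [pvLoopA, pvTokenize, hs, hi, hns.1, hns.2, ih]
        · -- space inside a token
          simp only [Bool.not_eq_true] at hi
          by_cases hd : depth == 0
          · -- token ends here
            have hns : c ≠ '<' ∧ c ≠ '>' := by
              constructor <;> rintro rfl <;> simp [PySem.Chars.isspace] at hs
            subst hi
            rcases h : pvTokenize cs false depth (index + 1) with _ | ⟨e, rest⟩
            · -- tokenize never returns []
              exfalso
              have : ∀ (l : List Char) (b : Bool) (d i : Int), pvTokenize l b d i ≠ [] := by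
                intro l
                induction l with
                | nil => intro b d i; simp [pvTokenize]
                | cons x xs ihx => intro b d i; simp only [pvTokenize]; split_ifs <;> simp [ihx]
              exact this cs false depth (index + 1) h
            · have ihh : ∀ pe ec, pvLoopA line cs true depth (index + 1) pe ec
                  = pvProcess line (e :: rest) pe ec := by
                intro pe ec
                simpa [h] using ih true depth (index + 1) pe ec
              simp only [pvLoopA, pvTokenize, hs, hd, Bool.not_false, Bool.and_self,
                if_true, Bool.not_true, h]
              simp only [pvProcess, PySem.Chars.strip]
              split_ifs <;> simp_all
          · -- depth ≠ 0: stay inside token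
            have hns : c ≠ '<' ∧ c ≠ '>' := by
              constructor <;> rintro rfl <;> simp [PySem.Chars.isspace] at hs
            subst hi
            simp [pvLoopA, pvTokenize, hs, hd, hns.1, hns.2, ih]
      · -- non-space character
        simp only [Bool.not_eq_true] at hs
        by_cases hi : init = true
        · -- token starts: no depth change even for '<'/'>'
          subst hi
          simp [pvLoopA, pvTokenize, hs, ih]
        · simp only [Bool.not_eq_true] at hi
          subst hi
          by_cases hlt : c = '<'
          · subst hlt; simp [pvLoopA, pvTokenize, hs, ih]
          · by_cases hgt : c = '>'
            · subst hgt; simp [pvLoopA, pvTokenize, hs, ih]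
            · simp [pvLoopA, pvTokenize, hs, hlt, hgt, ih]

-- ===== VERDICT (by name: the statement is the Claim_ definition above) =====
theorem get_end_of_typename_spec : Claim_equal_get_end_of_typename := by
  intro line _
  show get_end_of_typename line = get_end_of_typename_alt line
  simpa [get_end_of_typename, get_end_of_typename_alt] using
    pvFuse line.toList (PySem.Chars.rstrip line.toList) true 0 0 0 0
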